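-- pv_equiv track=rewrite | github.com/marchoag/citecheck | citecheck.py | _get_primary_citation
-- ===== SOURCE A (Python) =====
-- def _get_primary_citation(citations):
--     """Get the primary/official citation from a list of citations"""
--     if not citations:
--         return "No citation available"
--
--     # Priority order for reporters (official first)
--     reporter_priority = [
--         'U.S.',      # Supreme Court official
--         'Cal.',      # California official
--         'Cal. 2d',
--         'Cal. 3d',
--         'Cal. 4th',
--         'Cal. 5th',
--         'F.3d',      # Federal courts
--         'F.2d',
--         'F.',
--         'F. Supp. 3d',  # District courts
--         'F. Supp. 2d',
--         'F. Supp.',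
--         'S. Ct.',    # Supreme Court Reporter (West)
--         'L. Ed. 2d', # Lawyer's Edition
--         'L. Ed.',
--         'P.2d',      # Pacific Reporter (lower priority than state official)
--         'P.3d'
--     ]
--
--     # First, try to find citations by priority order
--     for priority_reporter in reporter_priority:
--         for cit in citations:
--             if cit.get('reporter') == priority_reporter and cit.get('volume'):
--                 return f"{cit.get('volume')} {cit.get('reporter')} {cit.get('page', '')}"
--
--     # If no priority reporter found, return the first available citation
--     for cit in citations:
--         if cit.get('volume') and cit.get('reporter'):
--             return f"{cit.get('volume')} {cit.get('reporter')} {cit.get('page', '')}"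
--
--     return "Citation format unavailable"
-- ===== SOURCE B (Python) =====
-- def _get_primary_citation(citations):
--     """Get the primary/official citation from a list of citations"""
--     if not citations:
--         return "No citation available"
--
--     priority = {r: i for i, r in enumerate([
--         'U.S.', 'Cal.', 'Cal. 2d', 'Cal. 3d', 'Cal. 4th', 'Cal. 5th',
--         'F.3d', 'F.2d', 'F.', 'F. Supp. 3d', 'F. Supp. 2d', 'F. Supp.',
--         'S. Ct.', 'L. Ed. 2d', 'L. Ed.', 'P.2d', 'P.3d'])}
--
--     best = None      # (priority index, citation); strict '<' keeps the first on ties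
--     fallback = None  # first citation with both volume and reporter truthy
--     for cit in citations:
--         vol = cit.get('volume')
--         rep = cit.get('reporter')
--         if vol:
--             i = priority.get(rep)
--             if i is not None and (best is None or i < best[0]):
--                 best = (i, cit)
--             if fallback is None and rep:
--                 fallback = cit
--
--     if best is not None:
--         cit = best[1]
--     elif fallback is not None:
--         cit = fallback
--     else:
--         return "Citation format unavailable"
--     return f"{cit.get('volume')} {cit.get('reporter')} {cit.get('page', '')}"
-- ===== Notes on version B (the rewrite author's own statement) =====
-- stated objective: alternative
-- what changed: Replaces the nested scan (one full pass over citations per priority reporter, 17 passes worst case) with a precomputed reporter->index dict and a single pass that tracks the minimum-index citation (strict < keeps the first on ties) and the first volume+reporter fallback simultaneously.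
import Mathlib
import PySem

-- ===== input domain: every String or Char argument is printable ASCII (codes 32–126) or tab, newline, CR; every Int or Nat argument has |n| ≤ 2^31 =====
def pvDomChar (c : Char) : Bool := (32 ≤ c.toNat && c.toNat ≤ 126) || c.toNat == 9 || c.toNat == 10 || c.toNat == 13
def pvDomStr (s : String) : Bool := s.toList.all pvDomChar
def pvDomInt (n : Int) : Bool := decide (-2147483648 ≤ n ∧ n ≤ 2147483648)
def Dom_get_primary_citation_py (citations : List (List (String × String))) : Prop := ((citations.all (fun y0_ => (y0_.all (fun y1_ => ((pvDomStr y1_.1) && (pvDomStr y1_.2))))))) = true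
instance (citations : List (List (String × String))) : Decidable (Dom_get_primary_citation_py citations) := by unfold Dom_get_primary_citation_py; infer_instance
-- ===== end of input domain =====

-- B restructures A's nested scan (one pass over the citations per priority reporter) into a
-- reporter->index dict and one pass keeping the minimum-index citation plus the fallback.


-- shared helpers: dict.get on an association list (first match, per the type convention),
-- Python truthiness of an Optional[str], and the f-string both Pythons use verbatim
def pvAssocGet? {ν : Type} : List (String × ν) → String → Option ν
  | [], _ => none
  | (k, v) :: rest, key => if k == key then some v else pvAssocGet? rest key

def pvTruthy : Option String → Bool
  | some s => !(s == "")
  | none => false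

def pvFmt (cit : List (String × String)) : String :=
  (pvAssocGet? cit "volume").getD "" ++ " " ++ (pvAssocGet? cit "reporter").getD "" ++ " "
    ++ (pvAssocGet? cit "page").getD ""

-- the fixed reporter_priority literal (identical in Source A and Source B)
def pvReporterPriority : List String :=
  ["U.S.", "Cal.", "Cal. 2d", "Cal. 3d", "Cal. 4th", "Cal. 5th", "F.3d", "F.2d", "F.",
   "F. Supp. 3d", "F. Supp. 2d", "F. Supp.", "S. Ct.", "L. Ed. 2d", "L. Ed.", "P.2d", "P.3d"]

-- ===== PORT A =====
def get_primary_citation_py (citations : List (List (String × String))) : String :=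
  if citations.isEmpty then "No citation available"
  else
    match pvReporterPriority.findSome? (fun p =>
        citations.find? (fun cit =>
          pvAssocGet? cit "reporter" == some p && pvTruthy (pvAssocGet? cit "volume"))) with
    | some cit => pvFmt cit
    | none =>
      match citations.find? (fun cit =>
          pvTruthy (pvAssocGet? cit "volume") && pvTruthy (pvAssocGet? cit "reporter")) with
      | some cit => pvFmt cit
      | none => "Citation format unavailable"

-- ===== PORT B =====
-- priority = {r: i for i, r in enumerate([...])}  (a dict is an association list here)
def pvPrioList : List (String × Int) :=
  (PySem.List.enumerate pvReporterPriority).map (fun ir => (ir.2, ir.1))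

-- one iteration of Source B's loop over (best, fallback)
def pvAltStep (acc : Option (Int × List (String × String)) × Option (List (String × String)))
    (cit : List (String × String)) :
    Option (Int × List (String × String)) × Option (List (String × String)) :=
  let vol := pvAssocGet? cit "volume"
  let rep := pvAssocGet? cit "reporter"
  if pvTruthy vol then
    let best :=
      match (match rep with | some r => pvAssocGet? pvPrioList r | none => none) with
      | some i =>
        match acc.1 with
        | none => some (i, cit)
        | some (j, _) => if i < j then some (i, cit) else acc.1
      | none => acc.1
    let fb :=
      match acc.2 with
      | none => if pvTruthy rep then some cit else none
      | some c => some c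
    (best, fb)
  else acc

def get_primary_citation_py_alt (citations : List (List (String × String))) : String :=
  if citations.isEmpty then "No citation available"
  else
    match citations.foldl pvAltStep (none, none) with
    | (some (_, cit), _) => pvFmt cit
    | (none, some cit) => pvFmt cit
    | (none, none) => "Citation format unavailable"

-- ===== PRECONDITION & SPEC =====
def Spec_get_primary_citation_py (citations : List (List (String × String))) (out : String) : Prop := out = get_primary_citation_py_alt citations
instance (citations : List (List (String × String))) (out : String) : Decidable (Spec_get_primary_citation_py citations out) := by unfold Spec_get_primary_citation_py; infer_instance

-- ===== CLAIM (what is proved, stated in full; the proofs are below) =====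
def Claim_equal_get_primary_citation_py : Prop := ∀ (citations : List (List (String × String))), Dom_get_primary_citation_py citations → Spec_get_primary_citation_py citations (get_primary_citation_py citations)

-- ===== LEMMAS AND PROOFS =====

-- proof-side key: position of cit's reporter in ps, provided its volume is truthy
def pvKeyIn : List String → String → Option Nat
  | [], _ => none
  | p :: ps, r => if p == r then some 0 else (pvKeyIn ps r).map (· + 1)

def pvKey (ps : List String) (cit : List (String × String)) : Option Nat :=
  if pvTruthy (pvAssocGet? cit "volume") then
    match pvAssocGet? cit "reporter" with
    | some r => pvKeyIn ps r
    | none => none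
  else none

def pvBestStep (ps : List String) (acc : Option (Nat × List (String × String)))
    (cit : List (String × String)) : Option (Nat × List (String × String)) :=
  match pvKey ps cit with
  | none => acc
  | some i =>
    match acc with
    | none => some (i, cit)
    | some (j, _) => if i < j then some (i, cit) else acc

def pvMatch (p : String) (cit : List (String × String)) : Bool :=
  pvAssocGet? cit "reporter" == some p && pvTruthy (pvAssocGet? cit "volume")

def pvFb (cit : List (String × String)) : Bool :=
  pvTruthy (pvAssocGet? cit "volume") && pvTruthy (pvAssocGet? cit "reporter")

-- the enumerate-built dict looked up at r is the position of r in the underlying list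
lemma pvAssoc_enum (ps : List String) (s : Int) (r : String) :
    pvAssocGet? ((PySem.List.enumerate ps s).map (fun ir => (ir.2, ir.1))) r
      = (pvKeyIn ps r).map (fun n => (n : Int) + s) := by
  induction ps generalizing s with
  | nil => simp [pvAssocGet?, pvKeyIn, PySem.List.enumerate_nil]
  | cons p ps ih =>
    simp only [PySem.List.enumerate_cons, List.map_cons, pvAssocGet?, pvKeyIn]
    cases hpr : p == r
    · simp only [Bool.false_eq_true, if_false, ih]
      cases pvKeyIn ps r <;> simp [Int.add_comm, Int.add_left_comm]
    · simp

lemma pvPrioList_get? (r : String) :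
    pvAssocGet? pvPrioList r = (pvKeyIn pvReporterPriority r).map (fun n => (n : Int)) := by
  rw [pvPrioList, pvAssoc_enum]
  simp

lemma pvKey_nil (cit : List (String × String)) : pvKey [] cit = none := by
  unfold pvKey pvKeyIn
  split <;> [skip; rfl]
  cases pvAssocGet? cit "reporter" <;> rfl

lemma pvKey_cons_of_match (p : String) (ps : List String) (cit : List (String × String))
    (h : pvMatch p cit = true) : pvKey (p :: ps) cit = some 0 := by
  unfold pvMatch at h
  obtain ⟨h1, h2⟩ := Bool.and_eq_true_iff.mp h
  unfold pvKey
  rw [h2, if_pos rfl]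
  obtain ⟨r, hr⟩ : ∃ r, pvAssocGet? cit "reporter" = some r := by
    cases hg : pvAssocGet? cit "reporter" with
    | none => rw [hg] at h1; simp at h1
    | some r => exact ⟨r, rfl⟩
  rw [hr] at h1 ⊢
  have : r = p := by simpa using h1
  subst this
  simp [pvKeyIn]

lemma pvKey_cons_of_not_match (p : String) (ps : List String) (cit : List (String × String))
    (h : pvMatch p cit = false) : pvKey (p :: ps) cit = (pvKey ps cit).map (· + 1) := by
  unfold pvMatch at h
  unfold pvKey
  cases hv : pvTruthy (pvAssocGet? cit "volume")
  · rfl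
  · rw [if_pos rfl, if_pos rfl]
    cases hg : pvAssocGet? cit "reporter" with
    | none => rfl
    | some r =>
      rw [hg, hv] at h
      simp only [Bool.and_true] at h
      have hrp : (p == r) = false := by
        cases hpr : p == r
        · rfl
        · exfalso; have : r = p := (beq_iff_eq.mp hpr).symm
          subst this; simp at h
      simp [pvKeyIn, hrp]

lemma foldl_bestStep_nil (cs : List (List (String × String)))
    (acc : Option (Nat × List (String × String))) :
    cs.foldl (pvBestStep []) acc = acc := by
  induction cs generalizing acc with
  | nil => rfl
  | cons c cs ih => rw [List.foldl_cons, pvBestStep, pvKey_nil]; exact ih acc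

lemma foldl_bestStep_zero_absorb (ps : List String) (cs : List (List (String × String)))
    (c : List (String × String)) :
    cs.foldl (pvBestStep ps) (some (0, c)) = some (0, c) := by
  induction cs with
  | nil => rfl
  | cons d cs ih =>
    rw [List.foldl_cons]
    have : pvBestStep ps (some (0, c)) d = some (0, c) := by
      unfold pvBestStep
      cases pvKey ps d <;> simp
    rw [this]; exact ih

lemma foldl_bestStep_find_zero (p : String) (ps : List String)
    (cs : List (List (String × String))) (c0 : List (String × String))
    (acc : Option (Nat × List (String × String)))
    (hacc : acc = none ∨ ∃ j c, acc = some (j, c) ∧ 0 < j)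
    (h : cs.find? (pvMatch p) = some c0) :
    cs.foldl (pvBestStep (p :: ps)) acc = some (0, c0) := by
  induction cs generalizing acc with
  | nil => simp at h
  | cons d cs ih =>
    rw [List.foldl_cons]
    cases hm : pvMatch p d
    · rw [List.find?_cons_of_neg (by simp [hm])] at h
      refine ih _ ?_ h
      have hk := pvKey_cons_of_not_match p ps d hm
      unfold pvBestStep
      rw [hk]
      cases hkd : pvKey ps d with
      | none => simpa using hacc
      | some m =>
        simp only [Option.map_some]
        rcases hacc with rfl | ⟨j, c, rfl, hj⟩
        · exact Or.inr ⟨m + 1, d, rfl, Nat.succ_pos m⟩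
        · by_cases hlt : m + 1 < j
          · simp only [if_pos hlt]; exact Or.inr ⟨m + 1, d, rfl, Nat.succ_pos m⟩
          · simp only [if_neg hlt]; exact Or.inr ⟨j, c, rfl, hj⟩
    · rw [List.find?_cons_of_pos hm] at h
      injection h with h; subst h
      have hk := pvKey_cons_of_match p ps d hm
      have : pvBestStep (p :: ps) acc d = some (0, d) := by
        unfold pvBestStep
        rw [hk]
        rcases hacc with rfl | ⟨j, c, rfl, hj⟩
        · rfl
        · simp [hj]
      rw [this]
      exact foldl_bestStep_zero_absorb _ _ _

lemma foldl_bestStep_shift (p : String) (ps : List String)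
    (cs : List (List (String × String))) (acc : Option (Nat × List (String × String)))
    (h : ∀ cit ∈ cs, pvMatch p cit = false) :
    cs.foldl (pvBestStep (p :: ps)) (acc.map (fun jc => (jc.1 + 1, jc.2)))
      = (cs.foldl (pvBestStep ps) acc).map (fun jc => (jc.1 + 1, jc.2)) := by
  induction cs generalizing acc with
  | nil => rfl
  | cons d cs ih =>
    rw [List.foldl_cons, List.foldl_cons]
    have hstep : pvBestStep (p :: ps) (acc.map (fun jc => (jc.1 + 1, jc.2))) d
        = (pvBestStep ps acc d).map (fun jc => (jc.1 + 1, jc.2)) := by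
      unfold pvBestStep
      rw [pvKey_cons_of_not_match p ps d (h d (List.mem_cons_self))]
      cases pvKey ps d with
      | none => rfl
      | some m =>
        rcases acc with _ | ⟨j, c⟩
        · rfl
        · simp only [Option.map_some]
          by_cases hlt : m < j
          · rw [if_pos hlt, if_pos (by omega)]; rfl
          · rw [if_neg hlt, if_neg (by omega)]; rfl
    rw [hstep]
    exact ih _ (fun c hc => h c (List.mem_cons_of_mem _ hc))

-- A's nested priority scan equals the minimum-index fold
lemma findSome?_eq_best (ps : List String) (cs : List (List (String × String))) :
    ps.findSome? (fun p => cs.find? (pvMatch p))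
      = (cs.foldl (pvBestStep ps) none).map (·.2) := by
  induction ps with
  | nil => rw [List.findSome?_nil, foldl_bestStep_nil]; rfl
  | cons p ps ih =>
    rw [List.findSome?_cons]
    cases hf : cs.find? (pvMatch p) with
    | some c0 =>
      rw [foldl_bestStep_find_zero p ps cs c0 none (Or.inl rfl) hf]
      rfl
    | none =>
      have hall : ∀ cit ∈ cs, pvMatch p cit = false := by
        intro c hc
        cases hm : pvMatch p c
        · rfl
        · exact absurd (List.find?_isSome.mpr ⟨c, hc, hm⟩) (by simp [hf])
      have := foldl_bestStep_shift p ps cs none hall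
      simp only [Option.map_none] at this
      rw [this, ih, Option.map_map]
      rfl

-- B's fold equals (best under Int cast, first fallback)
lemma foldl_altStep (cs : List (List (String × String)))
    (nacc : Option (Nat × List (String × String))) (fb : Option (List (String × String))) :
    cs.foldl pvAltStep (nacc.map (fun jc => ((jc.1 : Int), jc.2)), fb)
      = ((cs.foldl (pvBestStep pvReporterPriority) nacc).map (fun jc => ((jc.1 : Int), jc.2)),
         match fb with | some c => some c | none => cs.find? pvFb) := by
  induction cs generalizing nacc fb with
  | nil => cases fb <;> rfl
  | cons d cs ih =>
    rw [List.foldl_cons, List.foldl_cons]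
    have hstep : pvAltStep (nacc.map (fun jc => ((jc.1 : Int), jc.2)), fb) d
        = ((pvBestStep pvReporterPriority nacc d).map (fun jc => ((jc.1 : Int), jc.2)),
           match fb with
           | some c => some c
           | none => if pvFb d then some d else none) := by
      unfold pvAltStep pvBestStep pvKey pvFb
      cases hv : pvTruthy (pvAssocGet? d "volume")
      · simp only [hv, Bool.false_eq_true, if_false, Bool.false_and]
        cases fb <;> rfl
      · simp only [hv, Bool.true_and, reduceIte]
        cases hg : pvAssocGet? d "reporter" with
        | none =>
          cases fb <;> cases nacc <;> rfl
        | some r =>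
          have hA : (match some r with | some r => pvAssocGet? pvPrioList r | none => (none : Option Int)) = pvAssocGet? pvPrioList r := rfl
          have hB : (match some r with | some r => pvKeyIn pvReporterPriority r | none => (none : Option Nat)) = pvKeyIn pvReporterPriority r := rfl
          rw [hA, hB, pvPrioList_get?]
          cases hk : pvKeyIn pvReporterPriority r with
          | none =>
            cases fb <;> cases nacc <;> rfl
          | some m =>
            rcases nacc with _ | ⟨j, c⟩
            · cases fb <;> simp
            · by_cases hlt : m < j
              · cases fb <;> simp [hlt]
              · cases fb <;> simp [hlt]
    rw [hstep, ih]
    cases fb with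
    | some c => rfl
    | none =>
      cases hfb : pvFb d
      · rw [if_neg (by simp), List.find?_cons_of_neg (by simp [hfb])]
      · rw [if_pos rfl, List.find?_cons_of_pos hfb]

-- ===== VERDICT (by name: the statement is the Claim_ definition above) =====
theorem get_primary_citation_py_spec : Claim_equal_get_primary_citation_py := by
  intro citations _
  unfold Spec_get_primary_citation_py get_primary_citation_py get_primary_citation_py_alt
  cases citations with
  | nil => rfl
  | cons c cs =>
    simp only [List.isEmpty_cons, Bool.false_eq_true, if_false]
    have hB := foldl_altStep (c :: cs) none none
    simp only [Option.map_none] at hB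
    rw [hB]
    have h1 : (fun p => (c :: cs).find? (fun cit =>
        pvAssocGet? cit "reporter" == some p && pvTruthy (pvAssocGet? cit "volume")))
        = fun p => (c :: cs).find? (pvMatch p) := rfl
    have h2 : (fun cit => pvTruthy (pvAssocGet? cit "volume")
        && pvTruthy (pvAssocGet? cit "reporter")) = pvFb := rfl
    rw [h1, h2, findSome?_eq_best pvReporterPriority (c :: cs)]
    cases (c :: cs).foldl (pvBestStep pvReporterPriority) none with
    | none =>
      simp only [Option.map_none]
      cases (c :: cs).find? pvFb <;> rfl
    | some jc => rfl
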